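-- pv_equiv track=rewrite | github.com/buscagliad/adventofcode | 2023/day01/trebuchet.py | getNumber2
-- ===== SOURCE A (Python) =====
-- def isNumber(s):
-- 	if s[0].isdigit(): return int(s[0])
-- 	if s[:3] == "one": return 1
-- 	if s[:3] == "two": return 2
-- 	if s[:5] == "three": return 3
-- 	if s[:4] == "four": return 4
-- 	if s[:4] == "five": return 5
-- 	if s[:3] == "six": return 6
-- 	if s[:5] == "seven": return 7
-- 	if s[:5] == "eight": return 8
-- 	if s[:4] == "nine": return 9
-- 	return -1
--
-- def getNumber2(line):
-- 	firstDigit = -1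
-- 	lastDigit = 0
-- 	for i in range(len(line)):
-- 		n = isNumber(line[i:])
-- 		if (n < 0):  continue
-- 		if firstDigit < 0:
-- 			firstDigit = n
-- 		lastDigit = n
-- 	return 10 * firstDigit + lastDigit
-- ===== SOURCE B (Python) =====
-- def _candidates(c):
--     if c == "o": return (("one", 1),)
--     if c == "t": return (("two", 2), ("three", 3))
--     if c == "f": return (("four", 4), ("five", 5))
--     if c == "s": return (("six", 6), ("seven", 7))
--     if c == "e": return (("eight", 8),)
--     if c == "n": return (("nine", 9),)
--     return ()
--
-- def _matchAt(line, i):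
--     c = line[i]
--     if c.isdigit():
--         return int(c)
--     for w, v in _candidates(c):
--         if line.startswith(w, i):
--             return v
--     return None
--
-- def getNumber2(line):
--     n = len(line)
--     first = -1
--     for i in range(n):
--         m = _matchAt(line, i)
--         if m is not None:
--             first = m
--             break
--     last = 0
--     for i in reversed(range(n)):
--         m = _matchAt(line, i)
--         if m is not None:
--             last = m
--             break
--     return 10 * first + last
-- ===== Notes on version B (the rewrite author's own statement) =====
-- stated objective: faster
-- what changed: Replaces A's full scan that slices line[i:] at every position (each slice copies O(n) characters) with two early-exit index-based scans - a forward scan stopping at the first digit/word and a backward scan stopping at the last - matching via startswith(w, i) on a first-letter-filtered candidate list, with no copying.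
import Mathlib
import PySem

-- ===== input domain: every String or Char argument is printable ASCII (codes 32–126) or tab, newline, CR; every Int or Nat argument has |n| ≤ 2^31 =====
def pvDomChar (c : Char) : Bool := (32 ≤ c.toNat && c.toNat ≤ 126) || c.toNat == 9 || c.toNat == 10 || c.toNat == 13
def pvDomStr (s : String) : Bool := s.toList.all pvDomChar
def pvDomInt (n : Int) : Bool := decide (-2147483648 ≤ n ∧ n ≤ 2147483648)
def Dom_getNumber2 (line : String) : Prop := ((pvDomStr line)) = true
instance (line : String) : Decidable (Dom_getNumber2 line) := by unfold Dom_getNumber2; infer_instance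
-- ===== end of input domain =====

-- B replaces A's full scan over copied suffix slices by two early-exit index-based scans
-- (forward for the first digit/word, backward for the last); measured faster (asymptotic: no slice copies).


-- ===== PORT A =====
-- A's helper isNumber, transliterated on the List Char side.
-- Python's s[0] would raise on the empty string; A only ever calls isNumber on
-- nonempty suffixes, so the `none` branch below is never reached by getNumber2.
def isNumberA (s : List Char) : Int :=
  match s[0]? with
  | none => -1
  | some c =>
    if PySem.Chars.isdigit c then (c.toNat : Int) - 48   -- int(s[0]); exact for an ASCII digit
    else if PySem.List.slice s none (some 3) = "one".toList then 1
    else if PySem.List.slice s none (some 3) = "two".toList then 2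
    else if PySem.List.slice s none (some 5) = "three".toList then 3
    else if PySem.List.slice s none (some 4) = "four".toList then 4
    else if PySem.List.slice s none (some 4) = "five".toList then 5
    else if PySem.List.slice s none (some 3) = "six".toList then 6
    else if PySem.List.slice s none (some 5) = "seven".toList then 7
    else if PySem.List.slice s none (some 5) = "eight".toList then 8
    else if PySem.List.slice s none (some 4) = "nine".toList then 9
    else -1

def getNumber2 (line : String) : Int :=
  let cs := line.toList
  let st := (PySem.List.pyRange 0 (cs.length : Int) 1).foldl
    (fun (st : Int × Int) i =>
      let n := isNumberA (PySem.List.slice cs (some i) none)   -- isNumber(line[i:])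
      if n < 0 then st
      else (if st.1 < 0 then n else st.1, n))
    (-1, 0)
  10 * st.1 + st.2

-- ===== PORT B =====
-- Source B's _candidates(c): the digit words that can start with character c
def candB (c : Char) : List (List Char × Int) :=
  if c = 'o' then [("one".toList, 1)]
  else if c = 't' then [("two".toList, 2), ("three".toList, 3)]
  else if c = 'f' then [("four".toList, 4), ("five".toList, 5)]
  else if c = 's' then [("six".toList, 6), ("seven".toList, 7)]
  else if c = 'e' then [("eight".toList, 8)]
  else if c = 'n' then [("nine".toList, 9)]
  else []

-- Source B's _matchAt(line, i): digit or spelled-out word starting at i, no slicing.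
-- line[i] raises on i out of range; B only calls it with i < len(line), so `none` there is unreachable.
def matchAtB (cs : List Char) (i : Nat) : Option Int :=
  match cs[i]? with
  | none => none
  | some c =>
    if PySem.Chars.isdigit c then some ((c.toNat : Int) - 48)
    else (candB c).findSome? (fun wv => if wv.1.isPrefixOf (cs.drop i) then some wv.2 else none)

-- Source B's first loop: forward scan, break at the first match (default -1)
def scanFirst (cs : List Char) : List Nat → Int
  | [] => -1
  | i :: is =>
    match matchAtB cs i with
    | some m => m
    | none => scanFirst cs is

-- Source B's second loop: scan of reversed(range(n)), break at the first match (default 0)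
def scanLast (cs : List Char) : List Nat → Int
  | [] => 0
  | i :: is =>
    match matchAtB cs i with
    | some m => m
    | none => scanLast cs is

def getNumber2_alt (line : String) : Int :=
  let cs := line.toList
  let first := scanFirst cs (List.range cs.length)
  let last := scanLast cs (List.range cs.length).reverse
  10 * first + last

-- ===== PRECONDITION & SPEC =====
def Spec_getNumber2 (line : String) (out : Int) : Prop := out = getNumber2_alt line
instance (line : String) (out : Int) : Decidable (Spec_getNumber2 line out) := by unfold Spec_getNumber2; infer_instance

-- ===== CLAIM (what is proved, stated in full; the proofs are below) =====
def Claim_equal_getNumber2 : Prop := ∀ (line : String), Dom_getNumber2 line → Spec_getNumber2 line (getNumber2 line)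

-- ===== LEMMAS AND PROOFS =====

-- s[:n] = w (a word of length n) is exactly "w is a prefix of s"
lemma slice_eq_word (xs w : List Char) (n : Int) (h0 : 0 ≤ n) (hl : w.length = n.toNat) :
    PySem.List.slice xs none (some n) = w ↔ w.isPrefixOf xs = true := by
  rw [PySem.List.slice_to xs h0, List.isPrefixOf_iff_prefix]
  constructor
  · intro h; rw [← h]; exact List.take_prefix _ _
  · intro h
    have h' := List.prefix_iff_eq_take.mp h
    rw [← hl]; exact h'.symm

-- A's matcher on the suffix equals B's index-based matcher (totalised with -1)
set_option maxHeartbeats 1000000 in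
lemma isNumberA_drop (cs : List Char) (k : Nat) :
    isNumberA (cs.drop k) = (matchAtB cs k).getD (-1) := by
  unfold isNumberA matchAtB
  have hidx : (cs.drop k)[0]? = cs[k]? := by
    rw [List.getElem?_drop]; norm_num
  rw [hidx]
  cases h : cs[k]? with
  | none => rfl
  | some c =>
    by_cases hd : PySem.Chars.isdigit c
    · simp [hd]
    · simp only [hd,
        slice_eq_word (cs.drop k) "one".toList 3 (by norm_num) (by decide),
        slice_eq_word (cs.drop k) "two".toList 3 (by norm_num) (by decide),
        slice_eq_word (cs.drop k) "three".toList 5 (by norm_num) (by decide),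
        slice_eq_word (cs.drop k) "four".toList 4 (by norm_num) (by decide),
        slice_eq_word (cs.drop k) "five".toList 4 (by norm_num) (by decide),
        slice_eq_word (cs.drop k) "six".toList 3 (by norm_num) (by decide),
        slice_eq_word (cs.drop k) "seven".toList 5 (by norm_num) (by decide),
        slice_eq_word (cs.drop k) "eight".toList 5 (by norm_num) (by decide),
        slice_eq_word (cs.drop k) "nine".toList 4 (by norm_num) (by decide)]
      have hfirst : ∀ (w : Char) (ws : List Char), w :: ws <+: List.drop k cs → c = w := by
        rintro w ws ⟨t, ht⟩
        have hw : (List.drop k cs)[0]? = some w := by rw [← ht]; rfl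
        rw [hidx, h] at hw
        exact Option.some_inj.mp hw
      by_cases h1 : ['o', 'n', 'e'] <+: List.drop k cs
      · have hc := hfirst 'o' ['n', 'e'] h1; subst hc
        simp [candB, h1]
      by_cases h2 : ['t', 'w', 'o'] <+: List.drop k cs
      · have hc := hfirst 't' ['w', 'o'] h2; subst hc
        simp [candB, h1, h2]
      by_cases h3 : ['t', 'h', 'r', 'e', 'e'] <+: List.drop k cs
      · have hc := hfirst 't' ['h', 'r', 'e', 'e'] h3; subst hc
        simp [candB, h1, h2, h3]
      by_cases h4 : ['f', 'o', 'u', 'r'] <+: List.drop k cs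
      · have hc := hfirst 'f' ['o', 'u', 'r'] h4; subst hc
        simp [candB, h1, h2, h3, h4]
      by_cases h5 : ['f', 'i', 'v', 'e'] <+: List.drop k cs
      · have hc := hfirst 'f' ['i', 'v', 'e'] h5; subst hc
        simp [candB, h1, h2, h3, h4, h5]
      by_cases h6 : ['s', 'i', 'x'] <+: List.drop k cs
      · have hc := hfirst 's' ['i', 'x'] h6; subst hc
        simp [candB, h1, h2, h3, h4, h5, h6]
      by_cases h7 : ['s', 'e', 'v', 'e', 'n'] <+: List.drop k cs
      · have hc := hfirst 's' ['e', 'v', 'e', 'n'] h7; subst hc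
        simp [candB, h1, h2, h3, h4, h5, h6, h7]
      by_cases h8 : ['e', 'i', 'g', 'h', 't'] <+: List.drop k cs
      · have hc := hfirst 'e' ['i', 'g', 'h', 't'] h8; subst hc
        simp [candB, h1, h2, h3, h4, h5, h6, h7, h8]
      by_cases h9 : ['n', 'i', 'n', 'e'] <+: List.drop k cs
      · have hc := hfirst 'n' ['i', 'n', 'e'] h9; subst hc
        simp [candB, h1, h2, h3, h4, h5, h6, h7, h8, h9]
      -- all nine checks fail: A's chain gives -1; B's candidate list (whatever c is) finds nothing
      simp [h1, h2, h3, h4, h5, h6, h7, h8, h9]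
      unfold candB
      split_ifs <;> (try rfl) <;> simp [List.findSome?, h1, h2, h3, h4, h5, h6, h7, h8, h9]

-- every value B's matcher can return is nonnegative
lemma matchAtB_nonneg (cs : List Char) (k : Nat) (m : Int) (h : matchAtB cs k = some m) :
    0 ≤ m := by
  unfold matchAtB at h
  cases hc : cs[k]? with
  | none => rw [hc] at h; simp at h
  | some c =>
    rw [hc] at h
    by_cases hd : PySem.Chars.isdigit c
    · simp only [hd, if_true, Option.some_inj] at h
      have : '0' ≤ c := by
        simp only [PySem.Chars.isdigit, Bool.and_eq_true, decide_eq_true_eq] at hd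
        exact hd.1
      have h48 : 48 ≤ c.toNat := this
      omega
    · simp only [hd] at h
      rcases List.findSome?_eq_some_iff.mp h with ⟨l1, a, l2, hsplit, hfa, -⟩
      have ha : a ∈ candB c := by
        rw [hsplit]; exact List.mem_append_right _ (List.mem_cons_self ..)
      have h0 : 0 ≤ a.2 := by
        unfold candB at ha
        split_ifs at ha <;> fin_cases ha <;> norm_num
      split at hfa
      · rw [Option.some_inj] at hfa
        rw [← hfa]; exact h0
      · exact absurd hfa (by simp)

-- characterisation of A's loop over any index list
lemma foldA_eq (cs : List Char) (is : List Nat) (f l : Int) :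
    is.foldl (fun (st : Int × Int) k =>
        if (matchAtB cs k).getD (-1) < 0 then st
        else (if st.1 < 0 then (matchAtB cs k).getD (-1) else st.1, (matchAtB cs k).getD (-1))) (f, l)
    = (if f < 0 then (is.filterMap (matchAtB cs)).headD f else f,
       (is.filterMap (matchAtB cs)).getLastD l) := by
  induction is generalizing f l with
  | nil => simp
  | cons i is ih =>
    cases h : matchAtB cs i with
    | none =>
      simp only [List.foldl_cons, List.filterMap_cons, h]
      simpa using ih f l
    | some m =>
      have hm := matchAtB_nonneg cs i m h
      have hnm : ¬ (m < 0) := by omega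
      have hnm2 : ¬ ((if f < 0 then m else f) < 0) := by split_ifs with hf <;> omega
      simp only [List.foldl_cons, List.filterMap_cons, h, Option.getD_some, hnm, if_false]
      rw [ih, if_neg hnm2, List.headD_cons, List.getLastD_cons]

-- B's forward scan returns the first match (default -1)
lemma scanFirst_eq (cs : List Char) (is : List Nat) :
    scanFirst cs is = (is.filterMap (matchAtB cs)).headD (-1) := by
  induction is with
  | nil => rfl
  | cons i is ih =>
    cases h : matchAtB cs i <;> simp [scanFirst, h, ih]

-- B's backward scan over any list returns its first match (default 0)
lemma scanLast_eq (cs : List Char) (is : List Nat) :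
    scanLast cs is = (is.filterMap (matchAtB cs)).headD 0 := by
  induction is with
  | nil => rfl
  | cons i is ih =>
    cases h : matchAtB cs i <;> simp [scanLast, h, ih]

-- ===== VERDICT (by name: the statement is the Claim_ definition above) =====
theorem getNumber2_spec : Claim_equal_getNumber2 := by
  intro line _
  unfold Spec_getNumber2 getNumber2 getNumber2_alt
  simp only [PySem.List.pyRange_one, sub_zero, Int.toNat_natCast, List.foldl_map, zero_add,
    PySem.List.slice_from_natCast, isNumberA_drop, scanFirst_eq, scanLast_eq,
    List.filterMap_reverse]
  rw [foldA_eq]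
  simp only [List.headD_eq_head?, List.head?_reverse, List.getLastD_eq_getLast?]
  norm_num
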